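-- pv_equiv track=rewrite | github.com/Airyshtoteles/learnLeetCode | learnLeetCode_remote/Day27/Part1/battle_territories.py | winner_after_expansion
-- ===== SOURCE A (Python) =====
-- from collections import deque
-- from typing import List
--
-- def winner_after_expansion(grid: List[List[str]]) -> str:
--     if not grid or not grid[0]:
--         return "Draw"
--     n, m = len(grid), len(grid[0])
--     A, B = 1, 2
--     owner = [[-1]*m for _ in range(n)]  # -1=unreached,0=contested,1=A,2=B
--     dist = [[-1]*m for _ in range(n)]
--     q = deque()
--     cntA = cntB = 0
--     for i in range(n):
--         for j in range(m):
--             if grid[i][j] == 'A':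
--                 owner[i][j] = A
--                 dist[i][j] = 0
--                 q.append((i,j,0,A))
--                 cntA += 1
--             elif grid[i][j] == 'B':
--                 owner[i][j] = B
--                 dist[i][j] = 0
--                 q.append((i,j,0,B))
--                 cntB += 1
--     dirs = [(-1,0),(1,0),(0,-1),(0,1)]
--     while q:
--         x,y,t,typ = q.popleft()
--         # no expansion from contested
--         if owner[x][y] == 0:
--             continue
--         for dx,dy in dirs:
--             nx,ny = x+dx, y+dy
--             if nx<0 or nx>=n or ny<0 or ny>=m:
--                 continue
--             if grid[nx][ny] != '.':
--                 continue
--             if dist[nx][ny] == -1: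
--                 dist[nx][ny] = t+1
--                 owner[nx][ny] = typ
--                 q.append((nx,ny,t+1,typ))
--                 if typ == A:
--                     cntA += 1
--                 else:
--                     cntB += 1
--             else:
--                 if dist[nx][ny] == t+1 and owner[nx][ny] != 0 and owner[nx][ny] != typ:
--                     # tie -> contested; remove previously added count
--                     if owner[nx][ny] == A:
--                         cntA -= 1
--                     elif owner[nx][ny] == B:
--                         cntB -= 1
--                     owner[nx][ny] = 0
--                 # else if reached earlier or by same type, ignore
--     if cntA > cntB:
--         return "A"
--     if cntB > cntA:
--         return "B"
--     return "Draw"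
-- ===== SOURCE B (Python) =====
-- from typing import List
--
-- def winner_after_expansion(grid: List[List[str]]) -> str:
--     if not grid or not grid[0]:
--         return "Draw"
--     n, m = len(grid), len(grid[0])
--     owner = {}  # (i,j) -> 1 for A, 2 for B, 0 for contested; absent = unreached
--     for i in range(n):
--         for j in range(m):
--             if grid[i][j] == 'A':
--                 owner[(i, j)] = 1
--             elif grid[i][j] == 'B':
--                 owner[(i, j)] = 2
--     frontier = list(owner)
--     # level-by-level flood fill: collect this layer's claims, then settle them at once
--     while frontier:
--         claims = {}
--         for (x, y) in frontier:
--             t = owner[(x, y)]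
--             for c in ((x - 1, y), (x + 1, y), (x, y - 1), (x, y + 1)):
--                 if 0 <= c[0] < n and 0 <= c[1] < m and grid[c[0]][c[1]] == '.' and c not in owner:
--                     if c not in claims:
--                         claims[c] = t
--                     elif claims[c] != t:
--                         claims[c] = 0
--         frontier = []
--         for c, t in claims.items():
--             owner[c] = t
--             if t != 0:
--                 frontier.append(c)
--     vals = list(owner.values())
--     a, b = vals.count(1), vals.count(2)
--     return "A" if a > b else "B" if b > a else "Draw"
-- ===== Notes on version B (the rewrite author's own statement) =====
-- stated objective: alternative
-- what changed: Replaces the annotated FIFO-deque BFS over owner/dist/count matrices by a level-by-level flood fill over a single coordinate-keyed owner dictionary: each layer collects per-neighbour claims into a dict (unique claimant kept, clashing claimant overwritten to contested 0), then settles the whole layer at once, and the A/B totals are obtained by counting the owner dict's values at the end, so the queue, the dist matrix, the running counters and A's count-rollback on late ties all disappear.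
import Mathlib
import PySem

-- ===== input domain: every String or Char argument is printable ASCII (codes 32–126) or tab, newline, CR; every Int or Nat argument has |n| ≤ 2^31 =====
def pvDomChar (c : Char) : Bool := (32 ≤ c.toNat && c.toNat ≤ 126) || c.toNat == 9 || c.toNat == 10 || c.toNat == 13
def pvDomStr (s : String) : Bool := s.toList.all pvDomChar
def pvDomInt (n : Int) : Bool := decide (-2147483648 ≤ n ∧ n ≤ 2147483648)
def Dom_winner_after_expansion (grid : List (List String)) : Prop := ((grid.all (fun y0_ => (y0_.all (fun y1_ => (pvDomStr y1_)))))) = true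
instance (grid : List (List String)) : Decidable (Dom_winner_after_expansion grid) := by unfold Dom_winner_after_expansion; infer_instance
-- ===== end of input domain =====

-- B replaces A's annotated FIFO-queue BFS with owner/dist/count matrices by a layer-by-layer
-- flood fill over one coordinate-keyed owner dict (per-layer claims dict, settled at once,
-- winner counted from the dict's values at the end); alternative algorithm, same asymptotic cost.

-- shared low-level helper (both Pythons index the same nested list the same guarded way)
def cellAt (grid : List (List String)) (x y : Int) : String :=
  List.getD (List.getD grid x.toNat ([] : List String)) y.toNat ("" : String)

-- ===== PORT A =====
def pvMat (n m : Nat) : List (List Int) := List.replicate n (List.replicate m ((-1 : Int)))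
def gget (g : List (List Int)) (x y : Int) : Int := List.getD (List.getD g x.toNat ([] : List Int)) y.toNat (-1 : Int)
def gset (g : List (List Int)) (x y v : Int) : List (List Int) := g.modify x.toNat (fun r => r.set y.toNat v)

structure StA where
  owner : List (List Int)
  dist  : List (List Int)
  q     : List (Int × Int × Int × Int)
  cntA  : Int
  cntB  : Int

def initA (grid : List (List String)) (n m : Nat) : StA :=
  (List.range n).foldl (fun (st : StA) (i : Nat) =>
    (List.range m).foldl (fun (st : StA) (j : Nat) =>
      if cellAt grid (i : Int) (j : Int) = "A" then
        { owner := gset st.owner (i : Int) (j : Int) 1, dist := gset st.dist (i : Int) (j : Int) 0,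
          q := st.q ++ [((i : Int), (j : Int), 0, 1)], cntA := st.cntA + 1, cntB := st.cntB }
      else if cellAt grid (i : Int) (j : Int) = "B" then
        { owner := gset st.owner (i : Int) (j : Int) 2, dist := gset st.dist (i : Int) (j : Int) 0,
          q := st.q ++ [((i : Int), (j : Int), 0, 2)], cntA := st.cntA, cntB := st.cntB + 1 }
      else st) st)
    ⟨pvMat n m, pvMat n m, [], 0, 0⟩

def pvDirs : List (Int × Int) := [(-1, 0), (1, 0), (0, -1), (0, 1)]

def stepDirA (grid : List (List String)) (n m x y t typ : Int) (st : StA) (d : Int × Int) : StA :=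
  let nx := x + d.1
  let ny := y + d.2
  if nx < 0 ∨ n ≤ nx ∨ ny < 0 ∨ m ≤ ny then st
  else if cellAt grid nx ny ≠ "." then st
  else if gget st.dist nx ny = -1 then
    { owner := gset st.owner nx ny typ, dist := gset st.dist nx ny (t + 1),
      q := st.q ++ [(nx, ny, t + 1, typ)],
      cntA := if typ = 1 then st.cntA + 1 else st.cntA,
      cntB := if typ = 1 then st.cntB else st.cntB + 1 }
  else if gget st.dist nx ny = t + 1 ∧ gget st.owner nx ny ≠ 0 ∧ gget st.owner nx ny ≠ typ then
    { owner := gset st.owner nx ny 0, dist := st.dist, q := st.q,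
      cntA := if gget st.owner nx ny = 1 then st.cntA - 1 else st.cntA,
      cntB := if gget st.owner nx ny = 2 then st.cntB - 1 else st.cntB }
  else st

def loopA (grid : List (List String)) (n m : Int) : Nat → StA → StA
  | 0, st => st
  | fuel + 1, st =>
    match st.q with
    | [] => st
    | (x, y, t, typ) :: rest =>
      if gget st.owner x y = 0 then loopA grid n m fuel { st with q := rest }
      else loopA grid n m fuel (pvDirs.foldl (stepDirA grid n m x y t typ) { st with q := rest })

def winner_after_expansion (grid : List (List String)) : String :=
  match grid with
  | [] => "Draw"
  | r0 :: _ =>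
    if r0.length = 0 then "Draw"
    else
      let n := grid.length
      let m := r0.length
      let st0 := initA grid n m
      let st := loopA grid (n : Int) (m : Int) (st0.q.length + n * m + 1) st0
      if st.cntA > st.cntB then "A" else if st.cntB > st.cntA then "B" else "Draw"

-- ===== PORT B =====
def ownInit (grid : List (List String)) (n m : Nat) : PySem.Dict (Int × Int) Int :=
  (List.range n).foldl (fun (d : PySem.Dict (Int × Int) Int) (i : Nat) =>
    (List.range m).foldl (fun (d : PySem.Dict (Int × Int) Int) (j : Nat) =>
      if cellAt grid (i : Int) (j : Int) = "A" then d.insert ((i : Int), (j : Int)) 1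
      else if cellAt grid (i : Int) (j : Int) = "B" then d.insert ((i : Int), (j : Int)) 2
      else d) d) PySem.Dict.empty

def nbrsOf (c : Int × Int) : List (Int × Int) :=
  [(c.1 - 1, c.2), (c.1 + 1, c.2), (c.1, c.2 - 1), (c.1, c.2 + 1)]

def claimStep (grid : List (List String)) (n m : Int) (own : PySem.Dict (Int × Int) Int) (t : Int)
    (cl : PySem.Dict (Int × Int) Int) (c : Int × Int) : PySem.Dict (Int × Int) Int :=
  if 0 ≤ c.1 ∧ c.1 < n ∧ 0 ≤ c.2 ∧ c.2 < m ∧ cellAt grid c.1 c.2 = "." ∧ own.contains c = false then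
    match cl.get? c with
    | none => cl.insert c t
    | some u => if u ≠ t then cl.insert c 0 else cl
  else cl

def collectB (grid : List (List String)) (n m : Int) (own : PySem.Dict (Int × Int) Int)
    (frontier : List (Int × Int)) : PySem.Dict (Int × Int) Int :=
  frontier.foldl (fun cl c => (nbrsOf c).foldl (claimStep grid n m own (own.getD c 0)) cl)
    PySem.Dict.empty

def settleB (own : PySem.Dict (Int × Int) Int) (items : List ((Int × Int) × Int)) :
    PySem.Dict (Int × Int) Int × List (Int × Int) :=
  items.foldl (fun p it => (p.1.insert it.1 it.2, if it.2 ≠ 0 then p.2 ++ [it.1] else p.2))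
    (own, ([] : List (Int × Int)))

def loopB (grid : List (List String)) (n m : Int) :
    Nat → PySem.Dict (Int × Int) Int → List (Int × Int) → PySem.Dict (Int × Int) Int
  | 0, own, _ => own
  | fuel + 1, own, frontier =>
    match frontier with
    | [] => own
    | _ :: _ =>
      let cl := collectB grid n m own frontier
      let p := settleB own cl.items
      loopB grid n m fuel p.1 p.2

def winner_after_expansion_alt (grid : List (List String)) : String :=
  match grid with
  | [] => "Draw"
  | r0 :: _ =>
    if r0.length = 0 then "Draw"
    else
      let n := grid.length
      let m := r0.length
      let own0 := ownInit grid n m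
      let fin := loopB grid (n : Int) (m : Int) (n * m + 2) own0 own0.keys
      let vals := fin.values
      if vals.count 1 > vals.count 2 then "A"
      else if vals.count 2 > vals.count 1 then "B" else "Draw"

-- ===== PRECONDITION & SPEC =====
-- Pre_ excludes exactly the ragged grids on which the Python A raises IndexError:
-- both Pythons index every row up to the first row's length, so any shorter row raises.
def Pre_winner_after_expansion (grid : List (List String)) : Prop :=
  ∀ r ∈ grid, (List.headD grid ([] : List String)).length ≤ r.length
instance (grid : List (List String)) : Decidable (Pre_winner_after_expansion grid) := by
  unfold Pre_winner_after_expansion; infer_instance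

def pvWitness_winner_after_expansion : List (List String) := [["A", ".", "B"], [".", "#", "."]]

def Spec_winner_after_expansion (grid : List (List String)) (out : String) : Prop := out = winner_after_expansion_alt grid
instance (grid : List (List String)) (out : String) : Decidable (Spec_winner_after_expansion grid out) := by unfold Spec_winner_after_expansion; infer_instance

-- ===== CLAIM (what is proved, stated in full; the proofs are below) =====
def Claim_equal_winner_after_expansion : Prop := ∀ (grid : List (List String)), Dom_winner_after_expansion grid → Pre_winner_after_expansion grid → Spec_winner_after_expansion grid (winner_after_expansion grid)

-- ===== LEMMAS AND PROOFS =====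

-- ---------- matrix infrastructure ----------
def Shaped (g : List (List Int)) (n m : Nat) : Prop :=
  g.length = n ∧ ∀ i : Nat, i < n → (List.getD g i ([] : List Int)).length = m

theorem shaped_pvMat (n m : Nat) : Shaped (pvMat n m) n m := by
  refine ⟨by simp [pvMat], ?_⟩
  intro i hi
  simp [pvMat, List.getD_eq_getElem?_getD, List.getElem?_replicate, hi]

theorem gget_pvMat (n m : Nat) (x y : Int) : gget (pvMat n m) x y = -1 := by
  unfold gget pvMat
  by_cases hx : x.toNat < n
  · by_cases hy : y.toNat < m <;>
      simp [List.getD_eq_getElem?_getD, List.getElem?_replicate, hx, hy]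
  · simp [List.getD_eq_getElem?_getD, List.getElem?_replicate, hx]

theorem row_gset_self (g : List (List Int)) (x y v : Int) (hxl : x.toNat < g.length) :
    List.getD (gset g x y v) x.toNat ([] : List Int)
      = (List.getD g x.toNat ([] : List Int)).set y.toNat v := by
  unfold gset
  rw [List.getD_eq_getElem?_getD, List.getElem?_modify, List.getElem?_eq_getElem hxl]
  simp [List.getD_eq_getElem?_getD, List.getElem?_eq_getElem hxl]

theorem row_gset_ne (g : List (List Int)) (x y v : Int) (i : Nat) (hne : x.toNat ≠ i) :
    List.getD (gset g x y v) i ([] : List Int) = List.getD g i ([] : List Int) := by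
  unfold gset
  rw [List.getD_eq_getElem?_getD, List.getElem?_modify]
  simp [hne, List.getD_eq_getElem?_getD]

theorem shaped_gset (g : List (List Int)) (n m : Nat) (x y v : Int) (h : Shaped g n m) :
    Shaped (gset g x y v) n m := by
  obtain ⟨h1, h2⟩ := h
  refine ⟨by simpa [gset] using h1, ?_⟩
  intro i hi
  by_cases hxi : x.toNat = i
  · subst hxi
    rw [row_gset_self g x y v (by omega), List.length_set]
    exact h2 x.toNat hi
  · rw [row_gset_ne g x y v i hxi]
    exact h2 i hi

theorem gget_gset_self (g : List (List Int)) (n m : Nat) (x y v : Int) (h : Shaped g n m)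
    (hx0 : 0 ≤ x) (hx1 : x < (n : Int)) (hy0 : 0 ≤ y) (hy1 : y < (m : Int)) :
    gget (gset g x y v) x y = v := by
  obtain ⟨h1, h2⟩ := h
  have hxl : x.toNat < g.length := by omega
  have hyl : y.toNat < (List.getD g x.toNat ([] : List Int)).length := by
    rw [h2 x.toNat (by omega)]; omega
  unfold gget
  rw [row_gset_self g x y v hxl, List.getD_eq_getElem?_getD,
    List.getElem?_set_self (by simpa using hyl)]
  rfl

theorem gget_gset_ne (g : List (List Int)) (n m : Nat) (x y x' y' v : Int) (h : Shaped g n m)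
    (hx0 : 0 ≤ x) (hx1 : x < (n : Int)) (hy0 : 0 ≤ y) (hy1 : y < (m : Int))
    (hx0' : 0 ≤ x') (hy0' : 0 ≤ y')
    (hne : ¬(x' = x ∧ y' = y)) :
    gget (gset g x y v) x' y' = gget g x' y' := by
  obtain ⟨h1, h2⟩ := h
  unfold gget
  by_cases hxx : x'.toNat = x.toNat
  · have hx'x : x' = x := by omega
    have hyy : y.toNat ≠ y'.toNat := by
      intro hc
      exact hne ⟨hx'x, by omega⟩
    have hxl : x.toNat < g.length := by omega
    rw [hxx, row_gset_self g x y v hxl]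
    simp [List.getD_eq_getElem?_getD, List.getElem?_set_ne hyy]
  · rw [row_gset_ne g x y v x'.toNat (fun hc => hxx hc.symm)]

-- ---------- counting unreached cells (for fuel accounting) ----------
def countNeg (g : List (List Int)) : Nat :=
  (g.map (fun r => r.countP (fun v => decide (v = -1)))).sum

theorem row_len (g : List (List Int)) (n m : Nat) (h : Shaped g n m) (i : Nat)
    (hi : i < g.length) : g[i].length = m := by
  obtain ⟨h1, h2⟩ := h
  have := h2 i (by omega)
  rwa [List.getD_eq_getElem?_getD, List.getElem?_eq_getElem hi, Option.getD_some] at this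

theorem gget_elem (g : List (List Int)) (i j : Nat) (hi : i < g.length) (hj : j < g[i].length) :
    gget g (i : Int) (j : Int) = g[i][j] := by
  unfold gget
  rw [show ((i : Int)).toNat = i from by simp, show ((j : Int)).toNat = j from by simp]
  have hrow : List.getD g i ([] : List Int) = g[i] := by
    rw [List.getD_eq_getElem?_getD, List.getElem?_eq_getElem hi, Option.getD_some]
  rw [hrow, List.getD_eq_getElem?_getD, List.getElem?_eq_getElem hj, Option.getD_some]

theorem countP_set (r : List Int) (j : Nat) (v : Int) (p : Int → Bool) (hj : j < r.length) :
    (r.set j v).countP p + (if p (r[j]) then 1 else 0)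
      = r.countP p + (if p v then 1 else 0) := by
  induction r generalizing j with
  | nil => simp at hj
  | cons a r ih =>
    cases j with
    | zero =>
      simp only [List.set_cons_zero, List.countP_cons, List.getElem_cons_zero]
      by_cases h1 : p a <;> by_cases h2 : p v <;> simp [h1, h2] <;> omega
    | succ j =>
      simp only [List.set_cons_succ, List.countP_cons, List.getElem_cons_succ]
      have hjr : j < r.length := by simpa using hj
      have hrec := ih j hjr
      by_cases h1 : p a <;> by_cases h2 : p v <;> by_cases h3 : p (r[j]'hjr) <;>
        simp [h1, h2, h3] at hrec ⊢ <;> omega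

theorem sum_map_modify (l : List (List Int)) (i : Nat) (f : List Int → List Int)
    (k : List Int → Nat) (hi : i < l.length) :
    ((l.modify i f).map k).sum + k (l[i]) = (l.map k).sum + k (f (l[i])) := by
  induction l generalizing i with
  | nil => simp at hi
  | cons a l ih =>
    cases i with
    | zero =>
      simp only [List.modify_zero_cons, List.map_cons, List.sum_cons, List.getElem_cons_zero]
      omega
    | succ i =>
      simp only [List.modify_succ_cons, List.map_cons, List.sum_cons, List.getElem_cons_succ]
      have := ih i (by simpa using hi)
      omega

theorem countNeg_gset (g : List (List Int)) (n m : Nat) (x y v : Int) (h : Shaped g n m)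
    (hx0 : 0 ≤ x) (hx1 : x < (n : Int)) (hy0 : 0 ≤ y) (hy1 : y < (m : Int))
    (hold : gget g x y = -1) (hv : v ≠ -1) :
    countNeg (gset g x y v) + 1 = countNeg g := by
  have hi : x.toNat < g.length := by have := h.1; omega
  have hjr : y.toNat < g[x.toNat].length := by
    rw [row_len g n m h x.toNat hi]; omega
  have hx' : ((x.toNat : Int)) = x := Int.toNat_of_nonneg hx0
  have hy' : ((y.toNat : Int)) = y := Int.toNat_of_nonneg hy0
  have hval : g[x.toNat][y.toNat] = -1 := by
    rw [← gget_elem g x.toNat y.toNat hi hjr, hx', hy']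
    exact hold
  have hs := sum_map_modify g x.toNat (fun r => r.set y.toNat v)
    (fun r => r.countP (fun w => decide (w = -1))) hi
  have hcp := countP_set (g[x.toNat]) y.toNat v (fun w => decide (w = -1)) hjr
  rw [hval] at hcp
  simp [hv] at hcp
  simp at hs
  unfold countNeg gset
  omega

theorem countNeg_le (g : List (List Int)) (n m : Nat) (h : Shaped g n m) :
    countNeg g ≤ n * m := by
  unfold countNeg
  have hb : ∀ c ∈ g.map (fun r => r.countP (fun v => decide (v = -1))), c ≤ m := by
    intro c hc
    rcases List.mem_map.mp hc with ⟨r, hr, rfl⟩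
    rcases List.mem_iff_getElem.mp hr with ⟨i, hil, rfl⟩
    calc (g[i].countP fun v => decide (v = -1)) ≤ g[i].length := List.countP_le_length
      _ = m := row_len g n m h i hil
  calc (g.map (fun r => r.countP (fun v => decide (v = -1)))).sum
      ≤ (g.map (fun r => r.countP (fun v => decide (v = -1)))).length • m :=
        List.sum_le_card_nsmul _ m hb
    _ = n * m := by simp [h.1, smul_eq_mul]


-- ---------- dict helpers ----------
abbrev PVD := PySem.Dict (Int × Int) Int
abbrev PVEnt := Int × Int × Int × Int

def cellOf (e : PVEnt) : Int × Int := (e.1, e.2.1)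

theorem get?_some_of_contains (d : PVD) (k : Int × Int) (h : d.contains k = true) :
    ∃ v, d.get? k = some v := by
  rw [PySem.Dict.contains_eq_isSome_get?] at h
  exact Option.isSome_iff_exists.mp h

theorem mem_values_of_get? (d : PVD) (k : Int × Int) (v : Int) (h : d.get? k = some v) :
    v ∈ d.values :=
  List.mem_map.mpr ⟨(k, v), PySem.Dict.mem_items_of_get?_eq_some d h, rfl⟩

theorem insert_self_value (d : PVD) (k : Int × Int) (v : Int)
    (hnd : d.keys.Nodup) (h : d.get? k = some v) : d.insert k v = d := by
  apply PySem.Dict.ext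
  have hm : (k, v) ∈ d.items := PySem.Dict.mem_items_of_get?_eq_some d h
  have hc : d.contains k = true := by
    rw [PySem.Dict.contains_eq_isSome_get?, h]; rfl
  rw [PySem.Dict.items_insert_of_contains d v hc]
  have : ∀ p ∈ d.items, (if p.1 == k then (k, v) else p) = p := by
    intro p hp
    by_cases he : p.1 = k
    · have hpv : d.get? p.1 = some p.2 :=
        PySem.Dict.get?_of_mem_items d (by rcases p with ⟨a, b⟩; exact hp) hnd
      rw [he, h] at hpv
      rcases p with ⟨a, b⟩
      simp only at he
      subst he
      simp at hpv
      simp [hpv]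
    · simp [he]
  simp only [List.map_congr_left this, List.map_id']

theorem values_insert_fresh (d : PVD) (k : Int × Int) (v : Int) (h : d.contains k = false) :
    (d.insert k v).values = d.values ++ [v] := by
  show (d.insert k v).items.map Prod.snd = d.items.map Prod.snd ++ [v]
  rw [PySem.Dict.items_insert_of_not_contains d v h]
  simp

theorem count_map_replace {K : Type} [BEq K] [LawfulBEq K] (l : List (K × Int)) (k : K) (u : Int)
    (hnd : (l.map Prod.fst).Nodup) (hm : (k, u) ∈ l) (v w : Int) :
    ((l.map (fun p => if p.1 == k then (k, w) else p)).map Prod.snd).count v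
        + (if u = v then 1 else 0)
      = (l.map Prod.snd).count v + (if w = v then 1 else 0) := by
  induction l with
  | nil => simp at hm
  | cons p l ih =>
    simp only [List.map_cons, List.nodup_cons] at hnd
    rcases List.mem_cons.mp hm with he | ht
    · subst he
      have hrest : ∀ q ∈ l, (if q.1 == k then (k, w) else q) = q := by
        intro q hq
        have : q.1 ≠ k := fun hc => hnd.1 (hc ▸ List.mem_map.mpr ⟨q, hq, rfl⟩)
        simp [beq_eq_false_iff_ne.mpr this]
      simp only [beq_self_eq_true, if_true, List.map_cons, List.map_congr_left hrest,
        List.count_cons]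
      by_cases h1 : u = v <;> by_cases h2 : w = v <;> simp [h1, h2] <;> omega
    · have hne : p.1 ≠ k := by
        intro hc
        exact hnd.1 (hc ▸ List.mem_map.mpr ⟨(k, u), ht, rfl⟩)
      have := ih hnd.2 ht
      simp only [List.map_cons, beq_eq_false_iff_ne.mpr hne, List.count_cons] at this ⊢
      by_cases h3 : p.2 = v <;> simp [h3] at this ⊢ <;> omega

theorem count_values_insert_overwrite (d : PVD) (k : Int × Int) (u v w : Int)
    (hnd : d.keys.Nodup) (h : d.get? k = some u) :
    ((d.insert k w).values.count v) + (if u = v then 1 else 0)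
      = d.values.count v + (if w = v then 1 else 0) := by
  have hc : d.contains k = true := by rw [PySem.Dict.contains_eq_isSome_get?, h]; rfl
  show ((d.insert k w).items.map Prod.snd).count v + _ = _
  rw [PySem.Dict.items_insert_of_contains d w hc]
  exact count_map_replace d.items k u hnd (PySem.Dict.mem_items_of_get?_eq_some d h) v w

-- ---------- the coupling invariant ----------
def InB (n m : Nat) (c : Int × Int) : Prop :=
  0 ≤ c.1 ∧ c.1 < (n : Int) ∧ 0 ≤ c.2 ∧ c.2 < (m : Int)

def ovd (own cl : PVD) (c : Int × Int) : Int :=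
  match cl.get? c with
  | some v => v
  | none => own.getD c (-1)

structure MInv (n m : Nat) (st : StA) (own cl : PVD) (d : Int) : Prop where
  dpos : 0 ≤ d
  shO : Shaped st.owner n m
  shD : Shaped st.dist n m
  ndO : own.keys.Nodup
  ndC : cl.keys.Nodup
  inbO : ∀ c, own.contains c = true → InB n m c
  inbC : ∀ c, cl.contains c = true → InB n m c
  disj : ∀ c, cl.contains c = true → own.contains c = false
  valO : ∀ v ∈ own.values, v = 1 ∨ v = 2 ∨ v = 0
  valC : ∀ v ∈ cl.values, v = 1 ∨ v = 2 ∨ v = 0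
  ow : ∀ c, InB n m c → gget st.owner c.1 c.2 = ovd own cl c
  diN : ∀ c, InB n m c →
    (gget st.dist c.1 c.2 = -1 ↔ (own.contains c = false ∧ cl.contains c = false))
  diO : ∀ c, InB n m c → own.contains c = true → gget st.dist c.1 c.2 ≤ d
  diC : ∀ c, InB n m c → cl.contains c = true → gget st.dist c.1 c.2 = d + 1
  cA : st.cntA = (own.values.count 1 : Int) + (cl.values.count 1 : Int)
  cB : st.cntB = (own.values.count 2 : Int) + (cl.values.count 2 : Int)

def EntIn (dd : PVD) (t : Int) (e : PVEnt) : Prop :=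
  e.2.2.1 = t ∧ dd.contains (cellOf e) = true ∧
    (dd.getD (cellOf e) 0 ≠ 0 → e.2.2.2 = dd.getD (cellOf e) 0)

def PVExt (cl cl' : PVD) : Prop :=
  (∀ k, cl.contains k = true → cl'.contains k = true) ∧
  (∀ k, cl.contains k = true → cl'.getD k 0 = cl.getD k 0 ∨ cl'.getD k 0 = 0)

theorem Ext_rfl (cl : PVD) : PVExt cl cl := ⟨fun _ h => h, fun _ _ => Or.inl rfl⟩

theorem Ext_trans (c1 c2 c3 : PVD) (h1 : PVExt c1 c2) (h2 : PVExt c2 c3) : PVExt c1 c3 := by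
  refine ⟨fun k hk => h2.1 k (h1.1 k hk), fun k hk => ?_⟩
  rcases h2.2 k (h1.1 k hk) with h | h
  · rw [h]; exact h1.2 k hk
  · exact Or.inr h

theorem EntIn_mono (cl cl' : PVD) (t : Int) (e : PVEnt) (hx : PVExt cl cl')
    (h : EntIn cl t e) : EntIn cl' t e := by
  obtain ⟨h1, h2, h3⟩ := h
  refine ⟨h1, hx.1 _ h2, fun hne => ?_⟩
  rcases hx.2 _ h2 with he | he
  · rw [he]; exact h3 (he ▸ hne)
  · exact absurd he hne

def StepRel (d : Int) (st st' : StA) (cl cl' : PVD) : Prop :=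
  PVExt cl cl' ∧ st'.owner.length = st.owner.length ∧
  ∃ K E, cl'.keys = cl.keys ++ K ∧ st'.q = st.q ++ E ∧ E.map cellOf = K ∧
    (∀ e ∈ E, EntIn cl' (d + 1) e) ∧
    countNeg st'.dist + cl'.keys.length = countNeg st.dist + cl.keys.length

theorem StepRel_rfl (d : Int) (st : StA) (cl : PVD) : StepRel d st st cl cl :=
  ⟨Ext_rfl cl, rfl, [], [], by simp, by simp, rfl, by simp, rfl⟩

theorem StepRel_trans (d : Int) (s1 s2 s3 : StA) (c1 c2 c3 : PVD)
    (h1 : StepRel d s1 s2 c1 c2) (h2 : StepRel d s2 s3 c2 c3) : StepRel d s1 s3 c1 c3 := by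
  obtain ⟨x1, l1, K1, E1, hk1, hq1, hm1, he1, hc1⟩ := h1
  obtain ⟨x2, l2, K2, E2, hk2, hq2, hm2, he2, hc2⟩ := h2
  refine ⟨Ext_trans _ _ _ x1 x2, l1 ▸ l2, K1 ++ K2, E1 ++ E2, by rw [hk2, hk1, List.append_assoc],
    by rw [hq2, hq1, List.append_assoc], by rw [List.map_append, hm1, hm2], ?_, by omega⟩
  intro e he
  rcases List.mem_append.mp he with h | h
  · exact EntIn_mono c2 c3 (d + 1) e x2 (he1 e h)
  · exact he2 e h


-- ---------- the per-direction claim lemma (one neighbour of one expanding cell) ----------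
theorem length_gset (g : List (List Int)) (x y v : Int) : (gset g x y v).length = g.length := by
  simp [gset]

theorem step_dir (grid : List (List String)) (n m : Nat) (x y d v : Int) (st : StA)
    (own cl : PVD) (dir : Int × Int)
    (h : MInv n m st own cl d) (hv : v = 1 ∨ v = 2) :
    MInv n m (stepDirA grid (n : Int) (m : Int) x y d v st dir) own
      (claimStep grid (n : Int) (m : Int) own v cl (x + dir.1, y + dir.2)) d
    ∧ StepRel d st (stepDirA grid (n : Int) (m : Int) x y d v st dir) cl
        (claimStep grid (n : Int) (m : Int) own v cl (x + dir.1, y + dir.2)) := by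
  set nx := x + dir.1 with hnx
  set ny := y + dir.2 with hny
  by_cases hb : nx < 0 ∨ (n : Int) ≤ nx ∨ ny < 0 ∨ (m : Int) ≤ ny
  · have hA : stepDirA grid (n : Int) (m : Int) x y d v st dir = st := by
      unfold stepDirA
      rw [if_pos (by exact hb)]
    have hB : claimStep grid (n : Int) (m : Int) own v cl (nx, ny) = cl := by
      unfold claimStep
      rw [if_neg (by dsimp only; omega)]
    rw [hA, hB]
    exact ⟨h, StepRel_rfl d st cl⟩
  · push_neg at hb
    obtain ⟨hb1, hb2, hb3, hb4⟩ := hb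
    have hInB : InB n m (nx, ny) := ⟨hb1, hb2, hb3, hb4⟩
    by_cases hg : cellAt grid nx ny = "."
    · -- '.' neighbour
      by_cases hdist : gget st.dist nx ny = -1
      · -- fresh discovery
        obtain ⟨hocF, hccF⟩ := (h.diN (nx, ny) hInB).mp hdist
        have hA : stepDirA grid (n : Int) (m : Int) x y d v st dir =
            { owner := gset st.owner nx ny v, dist := gset st.dist nx ny (d + 1),
              q := st.q ++ [(nx, ny, d + 1, v)],
              cntA := if v = 1 then st.cntA + 1 else st.cntA,
              cntB := if v = 1 then st.cntB else st.cntB + 1 } := by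
          unfold stepDirA
          rw [if_neg (by omega), if_neg (by simpa using hg), if_pos hdist]
        have hgetn : cl.get? (nx, ny) = none :=
          (PySem.Dict.get?_eq_none_iff_contains cl (nx, ny)).mpr hccF
        have hB : claimStep grid (n : Int) (m : Int) own v cl (nx, ny) = cl.insert (nx, ny) v := by
          unfold claimStep
          rw [if_pos (by exact ⟨hb1, hb2, hb3, hb4, hg, hocF⟩), hgetn]
        rw [hA, hB]
        have hnm : (nx, ny) ∉ cl.keys := fun hc =>
          by rw [(PySem.Dict.contains_iff_mem_keys cl (nx, ny)).mpr hc] at hccF; exact absurd hccF (by simp)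
        have hkeys : (cl.insert (nx, ny) v).keys = cl.keys ++ [(nx, ny)] :=
          PySem.Dict.keys_insert_of_not_contains cl v hccF
        have hvals : (cl.insert (nx, ny) v).values = cl.values ++ [v] :=
          values_insert_fresh cl (nx, ny) v hccF
        have hd1 : d + 1 ≠ -1 := by have := h.dpos; omega
        constructor
        · refine ⟨h.dpos, shaped_gset _ n m _ _ _ h.shO, shaped_gset _ n m _ _ _ h.shD,
            h.ndO, ?_, h.inbO, ?_, ?_, h.valO, ?_, ?_, ?_, ?_, ?_, ?_, ?_⟩
          · rw [hkeys]
            refine List.Nodup.append h.ndC (List.nodup_singleton _) ?_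
            intro a ha hb
            rw [List.mem_singleton] at hb
            subst hb
            exact hnm ha
          · intro c hc
            rw [PySem.Dict.contains_insert] at hc
            rcases Bool.or_eq_true_iff.mp hc with hc | hc
            · rw [show c = (nx, ny) from by simpa using hc]; exact hInB
            · exact h.inbC c hc
          · intro c hc
            rw [PySem.Dict.contains_insert] at hc
            rcases Bool.or_eq_true_iff.mp hc with hc | hc
            · rw [show c = (nx, ny) from by simpa using hc]; exact hocF
            · exact h.disj c hc
          · intro w hw
            rcases PySem.Dict.mem_values_insert cl (nx, ny) v w hw with hw | hw
            · subst hw; tauto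
            · exact h.valC w hw
          · intro c hc
            by_cases he : c = (nx, ny)
            · subst he
              rw [gget_gset_self _ n m _ _ _ h.shO hb1 hb2 hb3 hb4]
              unfold ovd
              rw [PySem.Dict.get?_insert]
              simp
            · have := h.ow c hc
              rw [gget_gset_ne _ n m nx ny c.1 c.2 _ h.shO hb1 hb2 hb3 hb4 hc.1 hc.2.2.1
                (by rcases c with ⟨a, b⟩; simpa [Prod.ext_iff] using he), this]
              unfold ovd
              rw [PySem.Dict.get?_insert]
              simp [he]
          · intro c hc
            by_cases he : c = (nx, ny)
            · subst he
              rw [gget_gset_self _ n m _ _ _ h.shD hb1 hb2 hb3 hb4,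
                PySem.Dict.contains_insert]
              simp [hd1]
            · rw [gget_gset_ne _ n m nx ny c.1 c.2 _ h.shD hb1 hb2 hb3 hb4 hc.1 hc.2.2.1
                (by rcases c with ⟨a, b⟩; simpa [Prod.ext_iff] using he),
                PySem.Dict.contains_insert]
              have := h.diN c hc
              simpa [he] using this
          · intro c hc hco
            have he : c ≠ (nx, ny) := fun hcc => by rw [hcc] at hco; rw [hco] at hocF; simp at hocF
            rw [gget_gset_ne _ n m nx ny c.1 c.2 _ h.shD hb1 hb2 hb3 hb4 hc.1 hc.2.2.1
              (by rcases c with ⟨a, b⟩; simpa [Prod.ext_iff] using he)]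
            exact h.diO c hc hco
          · intro c hc hcc
            by_cases he : c = (nx, ny)
            · subst he
              rw [gget_gset_self _ n m _ _ _ h.shD hb1 hb2 hb3 hb4]
            · rw [gget_gset_ne _ n m nx ny c.1 c.2 _ h.shD hb1 hb2 hb3 hb4 hc.1 hc.2.2.1
                (by rcases c with ⟨a, b⟩; simpa [Prod.ext_iff] using he)]
              rw [PySem.Dict.contains_insert] at hcc
              rcases Bool.or_eq_true_iff.mp hcc with hcc | hcc
              · exact absurd (by simpa using hcc) he
              · exact h.diC c hc hcc
          · rw [hvals]
            have := h.cA
            rcases hv with hv | hv <;> subst hv <;> simp [List.count_append] <;> push_cast <;> omega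
          · rw [hvals]
            have := h.cB
            rcases hv with hv | hv <;> subst hv <;> simp [List.count_append] <;> push_cast <;> omega
        · refine ⟨⟨?_, ?_⟩, by simp [length_gset], [(nx, ny)], [(nx, ny, d + 1, v)],
            hkeys, rfl, rfl, ?_, ?_⟩
          · intro k hk
            rw [PySem.Dict.contains_insert, hk, Bool.or_true]
          · intro k hk
            have hne : k ≠ (nx, ny) := fun he => by rw [he] at hk; rw [hk] at hccF; simp at hccF
            rw [PySem.Dict.getD_insert, if_neg hne]
            exact Or.inl rfl
          · intro e he
            rw [List.mem_singleton] at he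
            subst he
            refine ⟨rfl, by rw [PySem.Dict.contains_insert]; simp [cellOf], ?_⟩
            intro _
            unfold cellOf
            rw [PySem.Dict.getD_insert]
            simp
          · rw [hkeys]
            simp only [List.length_append, List.length_singleton]
            have := countNeg_gset st.dist n m nx ny (d + 1) h.shD hb1 hb2 hb3 hb4 hdist hd1
            omega
      · -- already discovered
        have hor : own.contains (nx, ny) = true ∨ cl.contains (nx, ny) = true := by
          by_contra hc
          push_neg at hc
          exact hdist ((h.diN (nx, ny) hInB).mpr
            ⟨Bool.not_eq_true _ ▸ (by simpa using fun hh => hc.1 hh),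
             Bool.not_eq_true _ ▸ (by simpa using fun hh => hc.2 hh)⟩)
        by_cases hoc : own.contains (nx, ny) = true
        · -- settled in an earlier layer: both sides no-ops
          have hccF : cl.contains (nx, ny) = false := by
            by_contra hcc
            rw [h.disj (nx, ny) (by simpa using hcc)] at hoc
            simp at hoc
          have hle : gget st.dist nx ny ≤ d := h.diO (nx, ny) hInB hoc
          have hA : stepDirA grid (n : Int) (m : Int) x y d v st dir = st := by
            unfold stepDirA
            rw [if_neg (by omega), if_neg (by simpa using hg), if_neg hdist,
              if_neg (by intro hc; rw [← hnx, ← hny] at hc; exact absurd hc.1 (by omega))]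
          have hB : claimStep grid (n : Int) (m : Int) own v cl (nx, ny) = cl := by
            unfold claimStep
            rw [if_neg (by dsimp only; intro hc; rw [hoc] at hc; simpa using hc.2.2.2.2.2)]
          rw [hA, hB]
          exact ⟨h, StepRel_rfl d st cl⟩
        · -- claimed earlier in this same layer
          have hcc : cl.contains (nx, ny) = true := by tauto
          have hocF : own.contains (nx, ny) = false := by
            simpa using hoc
          obtain ⟨u, hu⟩ := get?_some_of_contains cl (nx, ny) hcc
          have hdd : gget st.dist nx ny = d + 1 := h.diC (nx, ny) hInB hcc
          have how : gget st.owner nx ny = u := by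
            have := h.ow (nx, ny) hInB
            unfold ovd at this
            rw [hu] at this
            exact this
          have hBg : claimStep grid (n : Int) (m : Int) own v cl (nx, ny)
              = if u ≠ v then cl.insert (nx, ny) 0 else cl := by
            unfold claimStep
            rw [if_pos (by exact ⟨hb1, hb2, hb3, hb4, hg, hocF⟩), hu]
          by_cases huv : u = v
          · -- same type claims again: both no-ops
            have hA : stepDirA grid (n : Int) (m : Int) x y d v st dir = st := by
              unfold stepDirA
              rw [if_neg (by omega), if_neg (by simpa using hg), if_neg hdist,
                if_neg (by rw [how, huv]; tauto)]
            rw [hA, hBg, if_neg (by simpa using huv)]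
            exact ⟨h, StepRel_rfl d st cl⟩
          · by_cases hu0 : u = 0
            · -- already contested: A no-op, B re-inserts the same 0
              have hA : stepDirA grid (n : Int) (m : Int) x y d v st dir = st := by
                unfold stepDirA
                rw [if_neg (by omega), if_neg (by simpa using hg), if_neg hdist,
                  if_neg (by rw [how, hu0]; tauto)]
              have hB : claimStep grid (n : Int) (m : Int) own v cl (nx, ny) = cl := by
                rw [hBg, if_pos huv]
                rw [hu0] at hu
                exact insert_self_value cl (nx, ny) 0 h.ndC hu
              rw [hA, hB]
              exact ⟨h, StepRel_rfl d st cl⟩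
            · -- genuine clash: contested now
              have hA : stepDirA grid (n : Int) (m : Int) x y d v st dir =
                  { owner := gset st.owner nx ny 0, dist := st.dist, q := st.q,
                    cntA := if u = 1 then st.cntA - 1 else st.cntA,
                    cntB := if u = 2 then st.cntB - 1 else st.cntB } := by
                unfold stepDirA
                rw [if_neg (by omega), if_neg (by simpa using hg), if_neg hdist,
                  if_pos (by rw [how]; exact ⟨hdd, hu0, huv⟩), how]
              have hB : claimStep grid (n : Int) (m : Int) own v cl (nx, ny)
                  = cl.insert (nx, ny) 0 := by
                rw [hBg, if_pos huv]
              rw [hA, hB]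
              have hkeys : (cl.insert (nx, ny) 0).keys = cl.keys :=
                PySem.Dict.keys_insert_of_contains cl 0 hcc
              have hcnt1 := count_values_insert_overwrite cl (nx, ny) u 1 0 h.ndC hu
              have hcnt2 := count_values_insert_overwrite cl (nx, ny) u 2 0 h.ndC hu
              constructor
              · refine ⟨h.dpos, shaped_gset _ n m _ _ _ h.shO, h.shD, h.ndO,
                  by rw [hkeys]; exact h.ndC, h.inbO, ?_, ?_, h.valO, ?_, ?_, ?_, ?_, ?_, ?_, ?_⟩
                · intro c hco
                  rw [PySem.Dict.contains_insert] at hco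
                  rcases Bool.or_eq_true_iff.mp hco with hco | hco
                  · rw [show c = (nx, ny) from by simpa using hco]; exact hInB
                  · exact h.inbC c hco
                · intro c hco
                  rw [PySem.Dict.contains_insert] at hco
                  rcases Bool.or_eq_true_iff.mp hco with hco | hco
                  · rw [show c = (nx, ny) from by simpa using hco]; exact hocF
                  · exact h.disj c hco
                · intro w hw
                  rcases PySem.Dict.mem_values_insert cl (nx, ny) 0 w hw with hw | hw
                  · subst hw; tauto
                  · exact h.valC w hw
                · intro c hc
                  by_cases he : c = (nx, ny)
                  · subst he
                    rw [gget_gset_self _ n m _ _ _ h.shO hb1 hb2 hb3 hb4]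
                    unfold ovd
                    rw [PySem.Dict.get?_insert]
                    simp
                  · rw [gget_gset_ne _ n m nx ny c.1 c.2 _ h.shO hb1 hb2 hb3 hb4 hc.1 hc.2.2.1
                      (by rcases c with ⟨a, b⟩; simpa [Prod.ext_iff] using he), h.ow c hc]
                    unfold ovd
                    rw [PySem.Dict.get?_insert]
                    simp [he]
                · intro c hc
                  have := h.diN c hc
                  rw [PySem.Dict.contains_insert]
                  by_cases he : c = (nx, ny)
                  · subst he
                    simpa [hcc] using this
                  · simpa [he] using this
                · intro c hc hco
                  exact h.diO c hc hco
                · intro c hc hco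
                  rw [PySem.Dict.contains_insert] at hco
                  rcases Bool.or_eq_true_iff.mp hco with hco | hco
                  · rw [show c = (nx, ny) from by simpa using hco]
                    exact hdd
                  · exact h.diC c hc hco
                · have := h.cA
                  by_cases hu1 : u = 1 <;> simp [hu1] at hcnt1 ⊢ <;> omega
                · have := h.cB
                  by_cases hu2 : u = 2 <;> simp [hu2] at hcnt2 ⊢ <;> omega
              · refine ⟨⟨?_, ?_⟩, by simp [length_gset], [], [], by simp [hkeys], by simp,
                  rfl, by simp, by rw [hkeys]⟩
                · intro k hk
                  rw [PySem.Dict.contains_insert, hk, Bool.or_true]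
                · intro k hk
                  by_cases he : k = (nx, ny)
                  · subst he
                    rw [PySem.Dict.getD_insert, if_pos rfl]
                    exact Or.inr rfl
                  · rw [PySem.Dict.getD_insert, if_neg he]
                    exact Or.inl rfl
    · -- not a '.' cell: both no-ops
      have hA : stepDirA grid (n : Int) (m : Int) x y d v st dir = st := by
        unfold stepDirA
        rw [if_neg (by omega), if_pos (by simpa using hg)]
      have hB : claimStep grid (n : Int) (m : Int) own v cl (nx, ny) = cl := by
        unfold claimStep
        rw [if_neg (by dsimp only; intro hc; exact hg hc.2.2.2.2.1)]
      rw [hA, hB]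
      exact ⟨h, StepRel_rfl d st cl⟩


-- ---------- one expanding cell = A's four-direction fold = B's neighbour fold ----------
theorem step_dirs_gen (grid : List (List String)) (n m : Nat) (x y d v : Int)
    (own : PVD) (L : List (Int × Int)) :
    ∀ (st : StA) (cl : PVD), MInv n m st own cl d → (v = 1 ∨ v = 2) →
    MInv n m (L.foldl (stepDirA grid (n : Int) (m : Int) x y d v) st) own
      (L.foldl (fun cl dd => claimStep grid (n : Int) (m : Int) own v cl (x + dd.1, y + dd.2)) cl) d
    ∧ StepRel d st (L.foldl (stepDirA grid (n : Int) (m : Int) x y d v) st) cl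
      (L.foldl (fun cl dd => claimStep grid (n : Int) (m : Int) own v cl (x + dd.1, y + dd.2)) cl) := by
  induction L with
  | nil => exact fun st cl h _ => ⟨h, StepRel_rfl d st cl⟩
  | cons dd L ih =>
    intro st cl h hv
    obtain ⟨h1, r1⟩ := step_dir grid n m x y d v st own cl dd h hv
    obtain ⟨h2, r2⟩ := ih _ _ h1 hv
    exact ⟨h2, StepRel_trans d _ _ _ _ _ _ r1 r2⟩

theorem step_cell (grid : List (List String)) (n m : Nat) (x y d v : Int)
    (st : StA) (own cl : PVD) (h : MInv n m st own cl d) (hv : v = 1 ∨ v = 2) :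
    MInv n m (pvDirs.foldl (stepDirA grid (n : Int) (m : Int) x y d v) st) own
      ((nbrsOf (x, y)).foldl (claimStep grid (n : Int) (m : Int) own v) cl) d
    ∧ StepRel d st (pvDirs.foldl (stepDirA grid (n : Int) (m : Int) x y d v) st) cl
      ((nbrsOf (x, y)).foldl (claimStep grid (n : Int) (m : Int) own v) cl) := by
  have hmap : nbrsOf (x, y) = pvDirs.map (fun dd => (x + dd.1, y + dd.2)) := by
    simp only [nbrsOf, pvDirs, List.map_cons, List.map_nil]
    norm_num
    omega
  rw [hmap, List.foldl_map]
  exact step_dirs_gen grid n m x y d v own pvDirs st cl h hv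

-- ---------- queue-state plumbing ----------
theorem MInv_setq (n m : Nat) (st : StA) (own cl : PVD) (d : Int) (q' : List PVEnt)
    (h : MInv n m st own cl d) : MInv n m { st with q := q' } own cl d := by
  cases st
  cases h
  constructor <;> assumption

theorem loopA_step (grid : List (List String)) (nI mI : Int) (f : Nat) (st : StA)
    (x y t typ : Int) (rest : List PVEnt) (hq : st.q = (x, y, t, typ) :: rest) :
    loopA grid nI mI (f + 1) st =
      if gget st.owner x y = 0 then loopA grid nI mI f { st with q := rest }
      else loopA grid nI mI f (pvDirs.foldl (stepDirA grid nI mI x y t typ) { st with q := rest }) := by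
  rw [loopA, hq]

theorem loopA_nilq (grid : List (List String)) (nI mI : Int) (f : Nat) (st : StA)
    (hq : st.q = []) : loopA grid nI mI f st = st := by
  cases f with
  | zero => rw [loopA]
  | succ f => rw [loopA, hq]

-- ---------- draining one whole BFS layer of the queue ----------
theorem layer (grid : List (List String)) (n m : Nat) (d : Int) (own : PVD) :
    ∀ (Qr : List PVEnt) (fA : Nat) (st : StA) (cl : PVD) (Qn : List PVEnt),
    MInv n m st own cl d →
    st.q = Qr ++ Qn →
    (∀ e ∈ Qr, EntIn own d e) →
    (∀ e ∈ Qn, EntIn cl (d + 1) e) →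
    Qn.map cellOf = cl.keys →
    ∃ (st' : StA) (Qn' : List PVEnt),
      loopA grid (n : Int) (m : Int) (Qr.length + fA) st = loopA grid (n : Int) (m : Int) fA st' ∧
      MInv n m st' own
        (((Qr.filter (fun e => !(own.getD (cellOf e) 0 == 0))).map cellOf).foldl
          (fun cl c => (nbrsOf c).foldl (claimStep grid (n : Int) (m : Int) own (own.getD c 0)) cl) cl) d ∧
      st'.q = Qn' ∧
      (∀ e ∈ Qn', EntIn
        (((Qr.filter (fun e => !(own.getD (cellOf e) 0 == 0))).map cellOf).foldl
          (fun cl c => (nbrsOf c).foldl (claimStep grid (n : Int) (m : Int) own (own.getD c 0)) cl) cl) (d + 1) e) ∧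
      Qn'.map cellOf =
        (((Qr.filter (fun e => !(own.getD (cellOf e) 0 == 0))).map cellOf).foldl
          (fun cl c => (nbrsOf c).foldl (claimStep grid (n : Int) (m : Int) own (own.getD c 0)) cl) cl).keys ∧
      countNeg st'.dist +
        (((Qr.filter (fun e => !(own.getD (cellOf e) 0 == 0))).map cellOf).foldl
          (fun cl c => (nbrsOf c).foldl (claimStep grid (n : Int) (m : Int) own (own.getD c 0)) cl) cl).keys.length
        = countNeg st.dist + cl.keys.length := by
  intro Qr
  induction Qr with
  | nil =>
    intro fA st cl Qn h hq hEr hEn hmap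
    exact ⟨st, Qn, by rw [List.length_nil, Nat.zero_add], by simpa using h, by simpa using hq,
      by simpa using hEn, by simpa using hmap, by simp⟩
  | cons e Qr ih =>
    intro fA st cl Qn h hq hEr hEn hmap
    obtain ⟨ex, ey, et, etyp⟩ := e
    obtain ⟨het0, hoc0, htyp0⟩ := hEr (ex, ey, et, etyp) (by simp)
    have het : et = d := by simpa using het0
    have hoc : own.contains (ex, ey) = true := by simpa [cellOf] using hoc0
    have htyp : own.getD (ex, ey) 0 ≠ 0 → etyp = own.getD (ex, ey) 0 := by
      simpa [cellOf] using htyp0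
    have hInB : InB n m (ex, ey) := h.inbO _ hoc
    have hccF : cl.contains (ex, ey) = false := by
      by_contra hcc
      rw [h.disj (ex, ey) (by simpa using hcc)] at hoc
      simp at hoc
    obtain ⟨u, hu⟩ := get?_some_of_contains own (ex, ey) hoc
    have hgu : own.getD (ex, ey) 0 = u := PySem.Dict.getD_of_get?_eq_some own 0 hu
    have how : gget st.owner ex ey = u := by
      have := h.ow (ex, ey) hInB
      unfold ovd at this
      rw [(PySem.Dict.get?_eq_none_iff_contains cl (ex, ey)).mpr hccF] at this
      rw [this, PySem.Dict.getD_of_get?_eq_some own (-1) hu]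
    have hlen : ((ex, ey, et, etyp) :: Qr).length + fA = (Qr.length + fA) + 1 := by
      simp [Nat.add_assoc, Nat.add_comm, Nat.add_left_comm]
    have hstep := loopA_step grid (n : Int) (m : Int) (Qr.length + fA) st ex ey et etyp (Qr ++ Qn)
      (by simpa using hq)
    by_cases hu0 : u = 0
    · -- contested source of this layer: A skips, B's frontier does not contain it
      have hfilt : ((ex, ey, et, etyp) :: Qr).filter (fun e => !(own.getD (cellOf e) 0 == 0))
          = Qr.filter (fun e => !(own.getD (cellOf e) 0 == 0)) := by
        rw [List.filter_cons]
        simp [cellOf, hgu, hu0]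
      obtain ⟨st', Qn', e1, e2, e3, e4, e5, e6⟩ :=
        ih fA { st with q := Qr ++ Qn } cl Qn (MInv_setq n m st own cl d _ h) rfl
          (fun e he => hEr e (List.mem_cons_of_mem _ he)) hEn hmap
      refine ⟨st', Qn', ?_, by rwa [hfilt], e3, by rwa [hfilt], by rwa [hfilt], ?_⟩
      · rw [hlen, hstep, if_pos (by rw [how, hu0]), e1]
      · rw [hfilt]
        simpa using e6
    · -- expanding cell
      have huv : u = 1 ∨ u = 2 := by
        have := h.valO u (mem_values_of_get? own (ex, ey) u hu)
        tauto
      have hety : etyp = u := by rw [htyp (by rw [hgu]; exact hu0), hgu]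
      have hfilt : ((ex, ey, et, etyp) :: Qr).filter (fun e => !(own.getD (cellOf e) 0 == 0))
          = (ex, ey, et, etyp) :: Qr.filter (fun e => !(own.getD (cellOf e) 0 == 0)) := by
        rw [List.filter_cons]
        simp [cellOf, hgu, hu0]
      have h1 : MInv n m { st with q := Qr ++ Qn } own cl d := MInv_setq n m st own cl d _ h
      obtain ⟨h2, r2⟩ := step_cell grid n m ex ey d u { st with q := Qr ++ Qn } own cl h1 huv
      set cl2 := (nbrsOf (ex, ey)).foldl (claimStep grid (n : Int) (m : Int) own u) cl with hcl2
      set st2 := pvDirs.foldl (stepDirA grid (n : Int) (m : Int) ex ey d u) { st with q := Qr ++ Qn }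
        with hst2
      obtain ⟨hxt, _, K, E, hk, hq2, hm2, hE2, hc2⟩ := r2
      obtain ⟨st', Qn', e1, e2, e3, e4, e5, e6⟩ :=
        ih fA st2 cl2 (Qn ++ E) h2 (by rw [hq2]; simp [List.append_assoc])
          (fun e he => hEr e (List.mem_cons_of_mem _ he))
          (fun e he => by
            rcases List.mem_append.mp he with he | he
            · exact EntIn_mono cl cl2 (d + 1) e hxt (hEn e he)
            · exact hE2 e he)
          (by rw [List.map_append, hmap, hm2, hk])
      refine ⟨st', Qn', ?_, ?_, e3, ?_, ?_, ?_⟩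
      · rw [hlen, hstep, if_neg (by rw [how]; exact hu0), het, hety, ← hst2]
        exact e1
      · rw [hfilt]
        simpa [List.foldl_cons, cellOf, hgu] using e2
      · rw [hfilt]
        intro e he
        have := e4 e he
        simpa [List.foldl_cons, cellOf, hgu] using this
      · rw [hfilt]
        simpa [List.foldl_cons, cellOf, hgu] using e5
      · rw [hfilt]
        have h5 : countNeg st2.dist + cl2.keys.length = countNeg st.dist + cl.keys.length := by
          simpa using hc2
        simp only [List.map_cons, List.foldl_cons, cellOf, hgu, ← hcl2] at e6 ⊢
        exact e6.trans h5


-- ---------- settling a layer ----------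
theorem fold_frontier (l : List ((Int × Int) × Int)) :
    ∀ acc : List (Int × Int),
      l.foldl (fun acc it => if it.2 ≠ 0 then acc ++ [it.1] else acc) acc
        = acc ++ (l.filter (fun it => !(it.2 == 0))).map Prod.fst := by
  induction l with
  | nil => intro acc; simp
  | cons p l ih =>
    intro acc
    rw [List.foldl_cons, List.filter_cons, ih]
    by_cases h : p.2 = 0
    · simp [h]
    · simp [h, List.append_assoc]

theorem settleB_eq (own : PVD) (l : List ((Int × Int) × Int)) :
    settleB own l = (l.foldl (fun d it => d.insert it.1 it.2) own,
      (l.filter (fun it => !(it.2 == 0))).map Prod.fst) := by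
  unfold settleB
  rw [PySem.List.foldl_prod_mk (fun d (it : (Int × Int) × Int) => d.insert it.1 it.2)
    (fun acc it => if it.2 ≠ 0 then acc ++ [it.1] else acc) l own []]
  rw [fold_frontier l []]
  simp

theorem align_filter (f : (Int × Int) → Int) :
    ∀ (Q : List PVEnt) (l : List ((Int × Int) × Int)),
      Q.map cellOf = l.map Prod.fst → (∀ p ∈ l, f p.1 = p.2) →
      (l.filter (fun it => !(it.2 == 0))).map Prod.fst
        = (Q.filter (fun e => !(f (cellOf e) == 0))).map cellOf := by
  intro Q
  induction Q with
  | nil =>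
    intro l hm _
    have : l = [] := by
      cases l with
      | nil => rfl
      | cons p l => simp at hm
    subst this
    simp
  | cons e Q ih =>
    intro l hm hv
    cases l with
    | nil => simp at hm
    | cons p l =>
      simp only [List.map_cons, List.cons.injEq] at hm
      obtain ⟨h1, h2⟩ := hm
      have hfp : f (cellOf e) = p.2 := by rw [h1]; exact hv p (by simp)
      rw [List.filter_cons, List.filter_cons, hfp]
      by_cases h0 : p.2 = 0
      · simp only [h0]
        simpa using ih l h2 (fun q hq => hv q (by simp [hq]))
      · have hb : (!(p.2 == 0)) = true := by simpa using h0
        simp only [hb, if_pos]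
        rw [List.map_cons, List.map_cons, h1]
        rw [ih l h2 (fun q hq => hv q (by simp [hq]))]

theorem loopB_step (grid : List (List String)) (nI mI : Int) (f : Nat)
    (own : PVD) (c : Int × Int) (F : List (Int × Int)) :
    loopB grid nI mI (f + 1) own (c :: F) =
      loopB grid nI mI f (settleB own (collectB grid nI mI own (c :: F)).items).1
        (settleB own (collectB grid nI mI own (c :: F)).items).2 := by
  rw [loopB]

theorem loopB_nilF (grid : List (List String)) (nI mI : Int) (f : Nat) (own : PVD) :
    loopB grid nI mI f own [] = own := by
  cases f with
  | zero => rw [loopB]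
  | succ f => rw [loopB]

-- ---------- one full round: drain the layer, then settle ----------
theorem outer (grid : List (List String)) (n m : Nat) :
    ∀ (fB : Nat) (d : Int) (own : PVD) (st : StA) (Q : List PVEnt) (F : List (Int × Int)) (fA : Nat),
    MInv n m st own PySem.Dict.empty d →
    st.q = Q →
    (∀ e ∈ Q, EntIn own d e) →
    F = (Q.filter (fun e => !(own.getD (cellOf e) 0 == 0))).map cellOf →
    countNeg st.dist + 1 ≤ fB →
    Q.length + countNeg st.dist ≤ fA →
    (loopA grid (n : Int) (m : Int) fA st).cntA
        = ((loopB grid (n : Int) (m : Int) fB own F).values.count 1 : Int) ∧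
    (loopA grid (n : Int) (m : Int) fA st).cntB
        = ((loopB grid (n : Int) (m : Int) fB own F).values.count 2 : Int) := by
  intro fB
  induction fB with
  | zero =>
    intro d own st Q F fA h hq hE hF hfB hfA
    omega
  | succ fB ih =>
    intro d own st Q F fA h hq hE hF hfB hfA
    obtain ⟨st', Qn', e1, e2, e3, e4, e5, e6⟩ :=
      layer grid n m d own Q (fA - Q.length) st PySem.Dict.empty [] h (by simp [hq]) hE
        (by simp) (by simp)
    have hfaeq : Q.length + (fA - Q.length) = fA := by omega
    rw [hfaeq] at e1
    have e6' : countNeg st'.dist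
        + (((Q.filter (fun e => !(own.getD (cellOf e) 0 == 0))).map cellOf).foldl
          (fun cl c => (nbrsOf c).foldl (claimStep grid (n : Int) (m : Int) own (own.getD c 0)) cl)
          PySem.Dict.empty).keys.length = countNeg st.dist := by
      simpa using e6
    set cl' := ((Q.filter (fun e => !(own.getD (cellOf e) 0 == 0))).map cellOf).foldl
      (fun cl c => (nbrsOf c).foldl (claimStep grid (n : Int) (m : Int) own (own.getD c 0)) cl)
      PySem.Dict.empty with hcl'
    have hcoll : collectB grid (n : Int) (m : Int) own F = cl' := by
      rw [hcl', hF]; rfl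
    have hlenQn : Qn'.length = cl'.keys.length := by
      rw [← e5, List.length_map]
    have hkeysitems : cl'.keys = cl'.items.map (fun it => it.1) := rfl
    have hdisj : ∀ a ∈ cl'.items, own.contains a.1 = false := by
      intro a ha
      refine e2.disj a.1 ?_
      rw [PySem.Dict.contains_iff_mem_keys, hkeysitems]
      exact List.mem_map.mpr ⟨a, ha, rfl⟩
    have hndK : (cl'.items.map (fun it => it.1)).Nodup := by
      rw [← hkeysitems]; exact e2.ndC
    set own2 := cl'.items.foldl (fun dd it => dd.insert it.1 it.2) own with hown2
    have hitems : own2.items = own.items ++ cl'.items := by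
      rw [hown2]
      have := PySem.Dict.items_foldl_insert_fresh cl'.items (fun it => it.1) (fun it => it.2)
        own hdisj hndK
      simpa using this
    have hkeys2 : own2.keys = own.keys ++ cl'.keys := by
      show own2.items.map (fun it => it.1) = own.items.map (fun it => it.1) ++ cl'.keys
      rw [hitems, List.map_append, hkeysitems]
    have hvals2 : own2.values = own.values ++ cl'.values := by
      show own2.items.map (fun it => it.2) = own.items.map (fun it => it.2) ++ cl'.values
      rw [hitems, List.map_append]; rfl
    have hnd2 : own2.keys.Nodup := by
      rw [hkeys2]
      refine List.Nodup.append e2.ndO e2.ndC ?_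
      intro a ha hb
      have hc : cl'.contains a = true := (PySem.Dict.contains_iff_mem_keys cl' a).mpr hb
      have := e2.disj a hc
      rw [(PySem.Dict.contains_iff_mem_keys own a).mpr ha] at this
      simp at this
    have hcon2 : ∀ c, own2.contains c = true ↔ (own.contains c = true ∨ cl'.contains c = true) := by
      intro c
      rw [PySem.Dict.contains_iff_mem_keys, PySem.Dict.contains_iff_mem_keys,
        PySem.Dict.contains_iff_mem_keys, hkeys2, List.mem_append]
    have hget2v : ∀ c v, cl'.get? c = some v → ∀ d0 : Int, own2.getD c d0 = v := by
      intro c v hcv d0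
      exact PySem.Dict.getD_of_mem_items own2
        (by rw [hitems]; exact List.mem_append_right _ (PySem.Dict.mem_items_of_get?_eq_some cl' hcv)) hnd2 d0
    have hget2o : ∀ c v, own.get? c = some v → ∀ d0 : Int, own2.getD c d0 = v := by
      intro c v hcv d0
      exact PySem.Dict.getD_of_mem_items own2
        (by rw [hitems]; exact List.mem_append_left _ (PySem.Dict.mem_items_of_get?_eq_some own hcv)) hnd2 d0
    have h2 : MInv n m st' own2 PySem.Dict.empty (d + 1) := by
      refine ⟨by have := e2.dpos; omega, e2.shO, e2.shD, hnd2, by simp, ?_,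
        by intro c hc; rw [PySem.Dict.contains_empty] at hc; simp at hc,
        by intro c hc; rw [PySem.Dict.contains_empty] at hc; simp at hc, ?_,
        by intro v hv; simp [PySem.Dict.empty, PySem.Dict.values] at hv, ?_, ?_, ?_,
        by intro c hc hcc; rw [PySem.Dict.contains_empty] at hcc; simp at hcc, ?_, ?_⟩
      · intro c hc
        rcases (hcon2 c).mp hc with hc | hc
        · exact e2.inbO c hc
        · exact e2.inbC c hc
      · intro v hv
        rw [hvals2] at hv
        rcases List.mem_append.mp hv with hv | hv
        · exact e2.valO v hv
        · exact e2.valC v hv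
      · intro c hc
        rw [e2.ow c hc]
        unfold ovd
        rw [PySem.Dict.get?_empty]
        cases hcv : cl'.get? c with
        | some v => rw [hget2v c v hcv]
        | none =>
          cases hov : own.get? c with
          | some w =>
            rw [hget2o c w hov, PySem.Dict.getD_of_get?_eq_some own (-1) hov]
          | none =>
            have hcf : own2.contains c = false := by
              rw [← Bool.not_eq_true]
              intro hcc
              rcases (hcon2 c).mp hcc with hcc | hcc
              · rw [PySem.Dict.contains_eq_isSome_get?, hov] at hcc; simp at hcc
              · rw [PySem.Dict.contains_eq_isSome_get?, hcv] at hcc; simp at hcc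
            rw [PySem.Dict.getD_of_not_contains own2 (-1) hcf,
              PySem.Dict.getD_of_get?_eq_none own (-1) hov]
      · intro c hc
        rw [e2.diN c hc, PySem.Dict.contains_empty]
        constructor
        · intro ⟨h1, h1'⟩
          refine ⟨?_, rfl⟩
          rw [← Bool.not_eq_true]
          intro hcc
          rcases (hcon2 c).mp hcc with hcc | hcc
          · rw [hcc] at h1; simp at h1
          · rw [hcc] at h1'; simp at h1'
        · intro ⟨h1, _⟩
          constructor
          · rw [← Bool.not_eq_true]
            intro hcc
            rw [(hcon2 c).mpr (Or.inl hcc)] at h1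
            simp at h1
          · rw [← Bool.not_eq_true]
            intro hcc
            rw [(hcon2 c).mpr (Or.inr hcc)] at h1
            simp at h1
      · intro c hc hcc
        rcases (hcon2 c).mp hcc with hcc | hcc
        · have := e2.diO c hc hcc; omega
        · have := e2.diC c hc hcc; omega
      · rw [e2.cA, hvals2]
        simp only [List.count_append, PySem.Dict.empty, PySem.Dict.values, List.map_nil,
          List.count_nil]
        push_cast
        ring
      · rw [e2.cB, hvals2]
        simp only [List.count_append, PySem.Dict.empty, PySem.Dict.values, List.map_nil,
          List.count_nil]
        push_cast
        ring
    have hE2 : ∀ e ∈ Qn', EntIn own2 (d + 1) e := by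
      intro e he
      obtain ⟨f1, f2, f3⟩ := e4 e he
      obtain ⟨v, hv⟩ := get?_some_of_contains cl' (cellOf e) f2
      refine ⟨f1, (hcon2 (cellOf e)).mpr (Or.inr f2), ?_⟩
      rw [hget2v (cellOf e) v hv 0]
      intro hvne
      rw [f3 (by rw [PySem.Dict.getD_of_get?_eq_some cl' 0 hv]; exact hvne),
        PySem.Dict.getD_of_get?_eq_some cl' 0 hv]
    have hvitems : ∀ p ∈ cl'.items, own2.getD p.1 0 = p.2 := by
      intro p hp
      exact hget2v p.1 p.2
        (PySem.Dict.get?_of_mem_items cl' (by rcases p with ⟨a, b⟩; exact hp) e2.ndC) 0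
    have hmapQn : Qn'.map cellOf = cl'.items.map Prod.fst := by
      rw [e5, hkeysitems]
    have hF2 : (cl'.items.filter (fun it => !(it.2 == 0))).map Prod.fst
        = (Qn'.filter (fun e => !(own2.getD (cellOf e) 0 == 0))).map cellOf :=
      align_filter (fun c => own2.getD c 0) Qn' cl'.items hmapQn hvitems
    cases hclitems : cl'.items with
    | nil =>
      -- nothing was claimed this layer: everything stops now
      have hkeysnil : cl'.keys = [] := by rw [hkeysitems, hclitems]; rfl
      have hQn'nil : Qn' = [] := by
        have := e5
        rw [hkeysnil] at this
        exact List.map_eq_nil_iff.mp this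
      have hA : loopA grid (n : Int) (m : Int) fA st = st' := by
        rw [e1]
        exact loopA_nilq grid _ _ _ st' (by rw [e3, hQn'nil])
      have hBend : loopB grid (n : Int) (m : Int) (fB + 1) own F = own := by
        cases F with
        | nil => exact loopB_nilF grid _ _ _ own
        | cons c F' =>
          rw [loopB_step, hcoll, hclitems]
          show loopB grid _ _ fB (settleB own []).1 (settleB own []).2 = own
          exact loopB_nilF grid _ _ _ own
      have hvnil : cl'.values = [] := by
        show cl'.items.map (fun it => it.2) = []
        rw [hclitems]; rfl
      rw [hA, hBend]
      constructor
      · rw [e2.cA, hvnil]; simp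
      · rw [e2.cB, hvnil]; simp
    | cons it its =>
      have hlen1 : 1 ≤ cl'.keys.length := by
        rw [hkeysitems, hclitems]
        simp
      have hFne : F ≠ [] := by
        intro hFn
        have hni : cl'.items = [] := by rw [← hcoll, hFn]; rfl
        rw [hclitems] at hni
        simp at hni
      obtain ⟨c, F', rfl⟩ : ∃ c F', F = c :: F' := by
        cases F with
        | nil => exact absurd rfl hFne
        | cons c F' => exact ⟨c, F', rfl⟩
      have hBstep : loopB grid (n : Int) (m : Int) (fB + 1) own (c :: F')
          = loopB grid (n : Int) (m : Int) fB own2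
            ((Qn'.filter (fun e => !(own2.getD (cellOf e) 0 == 0))).map cellOf) := by
        rw [loopB_step, hcoll, settleB_eq, ← hF2]
      obtain ⟨g1, g2⟩ := ih (d + 1) own2 st' Qn'
        ((Qn'.filter (fun e => !(own2.getD (cellOf e) 0 == 0))).map cellOf)
        (fA - Q.length) h2 e3 hE2 rfl (by omega) (by omega)
      rw [e1, hBstep]
      exact ⟨g1, g2⟩


-- ---------- initialization: A's matrices/queue/counters vs B's owner dict ----------
def PInit (n m : Nat) (st : StA) (own : PVD) : Prop :=
  MInv n m st own PySem.Dict.empty 0 ∧ (∀ e ∈ st.q, EntIn own 0 e) ∧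
  st.q.map cellOf = own.keys ∧ (∀ v ∈ own.values, v = 1 ∨ v = 2)

theorem init_insert (n m : Nat) (i j : Nat) (hi : i < n) (hj : j < m)
    (st : StA) (own : PVD) (hP : PInit n m st own)
    (hfresh : own.contains ((i : Int), (j : Int)) = false) (v : Int) (hv : v = 1 ∨ v = 2) :
    PInit n m
      { owner := gset st.owner (i : Int) (j : Int) v, dist := gset st.dist (i : Int) (j : Int) 0,
        q := st.q ++ [((i : Int), (j : Int), 0, v)],
        cntA := if v = 1 then st.cntA + 1 else st.cntA,
        cntB := if v = 1 then st.cntB else st.cntB + 1 }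
      (own.insert ((i : Int), (j : Int)) v)
    ∧ (∀ c, (own.insert ((i : Int), (j : Int)) v).contains c = true →
        c = ((i : Int), (j : Int)) ∨ own.contains c = true) := by
  obtain ⟨hM, hQ, hmap, hvals⟩ := hP
  have hb1 : (0 : Int) ≤ (i : Int) := Int.natCast_nonneg i
  have hb2 : ((i : Int)) < (n : Int) := by exact_mod_cast hi
  have hb3 : (0 : Int) ≤ (j : Int) := Int.natCast_nonneg j
  have hb4 : ((j : Int)) < (m : Int) := by exact_mod_cast hj
  have hInB : InB n m ((i : Int), (j : Int)) := ⟨hb1, hb2, hb3, hb4⟩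
  have hnm : ((i : Int), (j : Int)) ∉ own.keys := fun hc => by
    rw [(PySem.Dict.contains_iff_mem_keys own _).mpr hc] at hfresh; simp at hfresh
  have hkeys : (own.insert ((i : Int), (j : Int)) v).keys = own.keys ++ [((i : Int), (j : Int))] :=
    PySem.Dict.keys_insert_of_not_contains own v hfresh
  have hvins : (own.insert ((i : Int), (j : Int)) v).values = own.values ++ [v] :=
    values_insert_fresh own _ v hfresh
  refine ⟨⟨?_, ?_, ?_, ?_⟩, ?_⟩
  · refine ⟨le_refl 0, shaped_gset _ n m _ _ _ hM.shO, shaped_gset _ n m _ _ _ hM.shD, ?_,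
      hM.ndC, ?_, hM.inbC, ?_, ?_, hM.valC, ?_, ?_, ?_, ?_, ?_, ?_⟩
    · rw [hkeys]
      refine List.Nodup.append hM.ndO (List.nodup_singleton _) ?_
      intro a ha hb
      rw [List.mem_singleton] at hb
      subst hb
      exact hnm ha
    · intro c hc
      rw [PySem.Dict.contains_insert] at hc
      rcases Bool.or_eq_true_iff.mp hc with hc | hc
      · rw [show c = ((i : Int), (j : Int)) from by simpa using hc]; exact hInB
      · exact hM.inbO c hc
    · intro c hc
      rw [PySem.Dict.contains_empty] at hc
      simp at hc
    · intro w hw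
      rcases PySem.Dict.mem_values_insert own _ v w hw with hw | hw
      · subst hw; tauto
      · exact hM.valO w hw
    · intro c hc
      unfold ovd
      rw [PySem.Dict.get?_empty]
      by_cases he : c = ((i : Int), (j : Int))
      · subst he
        rw [gget_gset_self _ n m _ _ _ hM.shO hb1 hb2 hb3 hb4,
          PySem.Dict.getD_insert, if_pos rfl]
      · rw [gget_gset_ne _ n m (i : Int) (j : Int) c.1 c.2 _ hM.shO hb1 hb2 hb3 hb4 hc.1 hc.2.2.1
          (by rcases c with ⟨a, b⟩; simpa [Prod.ext_iff] using he),
          PySem.Dict.getD_insert, if_neg he]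
        have := hM.ow c hc
        unfold ovd at this
        rw [PySem.Dict.get?_empty] at this
        exact this
    · intro c hc
      rw [PySem.Dict.contains_empty]
      by_cases he : c = ((i : Int), (j : Int))
      · subst he
        rw [gget_gset_self _ n m _ _ _ hM.shD hb1 hb2 hb3 hb4,
          PySem.Dict.contains_insert]
        simp
      · rw [gget_gset_ne _ n m (i : Int) (j : Int) c.1 c.2 _ hM.shD hb1 hb2 hb3 hb4 hc.1 hc.2.2.1
          (by rcases c with ⟨a, b⟩; simpa [Prod.ext_iff] using he),
          PySem.Dict.contains_insert]
        have := hM.diN c hc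
        rw [PySem.Dict.contains_empty] at this
        simpa [he] using this
    · intro c hc hco
      by_cases he : c = ((i : Int), (j : Int))
      · subst he
        rw [gget_gset_self _ n m _ _ _ hM.shD hb1 hb2 hb3 hb4]
      · rw [gget_gset_ne _ n m (i : Int) (j : Int) c.1 c.2 _ hM.shD hb1 hb2 hb3 hb4 hc.1 hc.2.2.1
          (by rcases c with ⟨a, b⟩; simpa [Prod.ext_iff] using he)]
        rw [PySem.Dict.contains_insert] at hco
        rcases Bool.or_eq_true_iff.mp hco with hco | hco
        · exact absurd (by simpa using hco) he
        · exact hM.diO c hc hco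
    · intro c hc hcc
      rw [PySem.Dict.contains_empty] at hcc
      simp at hcc
    · have hce := hM.cA
      simp only [PySem.Dict.empty, PySem.Dict.values, List.map_nil, List.count_nil] at hce
      rw [hvins]
      rcases hv with hv | hv <;> subst hv <;>
        simp only [List.count_append, List.count_singleton, List.count_nil,
          PySem.Dict.empty, PySem.Dict.values, List.map_nil] <;>
        norm_num <;> push_cast <;> omega
    · have hce := hM.cB
      simp only [PySem.Dict.empty, PySem.Dict.values, List.map_nil, List.count_nil] at hce
      rw [hvins]
      rcases hv with hv | hv <;> subst hv <;>
        simp only [List.count_append, List.count_singleton, List.count_nil,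
          PySem.Dict.empty, PySem.Dict.values, List.map_nil] <;>
        norm_num <;> push_cast <;> omega
  · intro e he
    rcases List.mem_append.mp he with he | he
    · obtain ⟨f1, f2, f3⟩ := hQ e he
      have hne : cellOf e ≠ ((i : Int), (j : Int)) := fun hcc => by
        rw [hcc] at f2; rw [f2] at hfresh; simp at hfresh
      refine ⟨f1, by rw [PySem.Dict.contains_insert, f2, Bool.or_true], ?_⟩
      rw [PySem.Dict.getD_insert, if_neg hne]
      exact f3
    · rw [List.mem_singleton] at he
      subst he
      refine ⟨rfl, by rw [PySem.Dict.contains_insert]; simp [cellOf], ?_⟩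
      intro _
      unfold cellOf
      rw [PySem.Dict.getD_insert]
      simp
  · rw [List.map_append, hmap, hkeys]
    simp [cellOf]
  · intro w hw
    rcases PySem.Dict.mem_values_insert own _ v w hw with hw | hw
    · subst hw; exact hv
    · exact hvals w hw
  · intro c hc
    rw [PySem.Dict.contains_insert] at hc
    rcases Bool.or_eq_true_iff.mp hc with hc | hc
    · exact Or.inl (by simpa using hc)
    · exact Or.inr hc

theorem init_row (grid : List (List String)) (n m : Nat) (i : Nat) (hi : i < n) :
    ∀ (k : Nat), k ≤ m → ∀ (st : StA) (own : PVD), PInit n m st own →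
    (∀ c, own.contains c = true → c.1 < (i : Int)) →
    PInit n m
      ((List.range k).foldl (fun (st : StA) (j : Nat) =>
        if cellAt grid (i : Int) (j : Int) = "A" then
          { owner := gset st.owner (i : Int) (j : Int) 1, dist := gset st.dist (i : Int) (j : Int) 0,
            q := st.q ++ [((i : Int), (j : Int), 0, 1)], cntA := st.cntA + 1, cntB := st.cntB }
        else if cellAt grid (i : Int) (j : Int) = "B" then
          { owner := gset st.owner (i : Int) (j : Int) 2, dist := gset st.dist (i : Int) (j : Int) 0,
            q := st.q ++ [((i : Int), (j : Int), 0, 2)], cntA := st.cntA, cntB := st.cntB + 1 }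
        else st) st)
      ((List.range k).foldl (fun (d : PVD) (j : Nat) =>
        if cellAt grid (i : Int) (j : Int) = "A" then d.insert ((i : Int), (j : Int)) 1
        else if cellAt grid (i : Int) (j : Int) = "B" then d.insert ((i : Int), (j : Int)) 2
        else d) own)
    ∧ (∀ c, ((List.range k).foldl (fun (d : PVD) (j : Nat) =>
        if cellAt grid (i : Int) (j : Int) = "A" then d.insert ((i : Int), (j : Int)) 1
        else if cellAt grid (i : Int) (j : Int) = "B" then d.insert ((i : Int), (j : Int)) 2
        else d) own).contains c = true →
        c.1 < (i : Int) ∨ (c.1 = (i : Int) ∧ c.2 < (k : Int))) := by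
  intro k
  induction k with
  | zero =>
    intro _ st own hP hB
    exact ⟨by simpa using hP, fun c hc => Or.inl (hB c (by simpa using hc))⟩
  | succ k ih =>
    intro hk st own hP hB
    obtain ⟨hP1, hB1⟩ := ih (by omega) st own hP hB
    rw [List.range_succ, List.foldl_append, List.foldl_append]
    simp only [List.foldl_cons, List.foldl_nil]
    have hjm : k < m := by omega
    have hfresh : ((List.range k).foldl (fun (d : PVD) (j : Nat) =>
        if cellAt grid (i : Int) (j : Int) = "A" then d.insert ((i : Int), (j : Int)) 1
        else if cellAt grid (i : Int) (j : Int) = "B" then d.insert ((i : Int), (j : Int)) 2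
        else d) own).contains ((i : Int), (k : Int)) = false := by
      rw [← Bool.not_eq_true]
      intro hc
      rcases hB1 _ hc with hc | hc
      · simp at hc
      · have := hc.2
        simp at this
    by_cases hA : cellAt grid (i : Int) (k : Int) = "A"
    · rw [if_pos hA, if_pos hA]
      obtain ⟨hP2, hnew⟩ := init_insert n m i k hi hjm _ _ hP1 hfresh 1 (Or.inl rfl)
      refine ⟨by simpa using hP2, ?_⟩
      intro c hc
      rcases hnew c hc with hc | hc
      · subst hc
        exact Or.inr ⟨rfl, by push_cast; omega⟩
      · rcases hB1 c hc with hc | hc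
        · exact Or.inl hc
        · exact Or.inr ⟨hc.1, by push_cast at hc ⊢; omega⟩
    · rw [if_neg hA, if_neg hA]
      by_cases hBB : cellAt grid (i : Int) (k : Int) = "B"
      · rw [if_pos hBB, if_pos hBB]
        obtain ⟨hP2, hnew⟩ := init_insert n m i k hi hjm _ _ hP1 hfresh 2 (Or.inr rfl)
        refine ⟨by simpa using hP2, ?_⟩
        intro c hc
        rcases hnew c hc with hc | hc
        · subst hc
          exact Or.inr ⟨rfl, by push_cast; omega⟩
        · rcases hB1 c hc with hc | hc
          · exact Or.inl hc
          · exact Or.inr ⟨hc.1, by push_cast at hc ⊢; omega⟩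
      · rw [if_neg hBB, if_neg hBB]
        refine ⟨hP1, ?_⟩
        intro c hc
        rcases hB1 c hc with hc | hc
        · exact Or.inl hc
        · exact Or.inr ⟨hc.1, by push_cast at hc ⊢; omega⟩

theorem init_all (grid : List (List String)) (n m : Nat) :
    PInit n m (initA grid n m) (ownInit grid n m)
    ∧ (∀ v ∈ (ownInit grid n m).values, v = 1 ∨ v = 2) := by
  suffices h : ∀ (r : Nat), r ≤ n →
      PInit n m
        ((List.range r).foldl (fun (st : StA) (i : Nat) =>
          (List.range m).foldl (fun (st : StA) (j : Nat) =>
            if cellAt grid (i : Int) (j : Int) = "A" then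
              { owner := gset st.owner (i : Int) (j : Int) 1,
                dist := gset st.dist (i : Int) (j : Int) 0,
                q := st.q ++ [((i : Int), (j : Int), 0, 1)], cntA := st.cntA + 1, cntB := st.cntB }
            else if cellAt grid (i : Int) (j : Int) = "B" then
              { owner := gset st.owner (i : Int) (j : Int) 2,
                dist := gset st.dist (i : Int) (j : Int) 0,
                q := st.q ++ [((i : Int), (j : Int), 0, 2)], cntA := st.cntA, cntB := st.cntB + 1 }
            else st) st)
          ⟨pvMat n m, pvMat n m, [], 0, 0⟩)
        ((List.range r).foldl (fun (d : PVD) (i : Nat) =>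
          (List.range m).foldl (fun (d : PVD) (j : Nat) =>
            if cellAt grid (i : Int) (j : Int) = "A" then d.insert ((i : Int), (j : Int)) 1
            else if cellAt grid (i : Int) (j : Int) = "B" then d.insert ((i : Int), (j : Int)) 2
            else d) d) PySem.Dict.empty)
      ∧ (∀ c, ((List.range r).foldl (fun (d : PVD) (i : Nat) =>
          (List.range m).foldl (fun (d : PVD) (j : Nat) =>
            if cellAt grid (i : Int) (j : Int) = "A" then d.insert ((i : Int), (j : Int)) 1
            else if cellAt grid (i : Int) (j : Int) = "B" then d.insert ((i : Int), (j : Int)) 2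
            else d) d) PySem.Dict.empty).contains c = true → c.1 < (r : Int)) by
    obtain ⟨hP, _⟩ := h n (le_refl n)
    unfold initA ownInit
    exact ⟨hP, hP.2.2.2⟩
  intro r
  induction r with
  | zero =>
    intro _
    simp only [List.range_zero, List.foldl_nil]
    constructor
    · refine ⟨⟨le_refl 0, shaped_pvMat n m, shaped_pvMat n m, by simp, by simp,
        ?_, ?_, ?_, ?_, ?_, ?_, ?_, ?_, ?_, by simp, by simp⟩, by simp, by simp, ?_⟩
      · intro c hc; rw [PySem.Dict.contains_empty] at hc; simp at hc
      · intro c hc; rw [PySem.Dict.contains_empty] at hc; simp at hc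
      · intro c hc; rw [PySem.Dict.contains_empty] at hc; simp at hc
      · intro v hv; simp [PySem.Dict.empty, PySem.Dict.values] at hv
      · intro v hv; simp [PySem.Dict.empty, PySem.Dict.values] at hv
      · intro c _
        unfold ovd
        rw [PySem.Dict.get?_empty, PySem.Dict.getD_empty]
        exact gget_pvMat n m c.1 c.2
      · intro c _
        rw [PySem.Dict.contains_empty]
        simp [gget_pvMat n m c.1 c.2]
      · intro c _ hc; rw [PySem.Dict.contains_empty] at hc; simp at hc
      · intro c _ hc; rw [PySem.Dict.contains_empty] at hc; simp at hc
      · intro v hv; simp [PySem.Dict.empty, PySem.Dict.values] at hv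
    · intro c hc
      simp at hc
  | succ r ih =>
    intro hr
    obtain ⟨hP1, hB1⟩ := ih (by omega)
    rw [List.range_succ, List.foldl_append, List.foldl_append]
    simp only [List.foldl_cons, List.foldl_nil]
    obtain ⟨hP2, hB2⟩ := init_row grid n m r (by omega) m (le_refl m) _ _ hP1 hB1
    refine ⟨hP2, ?_⟩
    intro c hc
    rcases hB2 c hc with hc | hc
    · push_cast at hc ⊢; omega
    · push_cast at hc ⊢; omega

-- ---------- final assembly ----------
theorem main_nonempty (r0 : List String) (rest : List (List String)) (h0 : ¬ r0.length = 0) :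
    winner_after_expansion (r0 :: rest) = winner_after_expansion_alt (r0 :: rest) := by
  unfold winner_after_expansion winner_after_expansion_alt
  simp only [if_neg h0]
  set grid := r0 :: rest with hgrid
  set n := grid.length with hn
  set m := r0.length with hm
  obtain ⟨hP, hval12⟩ := init_all grid n m
  have hC : countNeg (initA grid n m).dist ≤ n * m := countNeg_le _ n m hP.1.shD
  have hfilt : ((initA grid n m).q.filter
      (fun e => !((ownInit grid n m).getD (cellOf e) 0 == 0))) = (initA grid n m).q := by
    rw [List.filter_eq_self]
    intro e he
    obtain ⟨f1, f2, f3⟩ := hP.2.1 e he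
    obtain ⟨v, hv⟩ := get?_some_of_contains _ _ f2
    have hv12 : v = 1 ∨ v = 2 := hval12 v (mem_values_of_get? _ _ v hv)
    rw [PySem.Dict.getD_of_get?_eq_some _ 0 hv]
    rcases hv12 with h | h <;> subst h <;> simp
  have hFeq : (ownInit grid n m).keys = (((initA grid n m).q.filter
      (fun e => !((ownInit grid n m).getD (cellOf e) 0 == 0))).map cellOf) := by
    rw [hfilt, hP.2.2.1]
  obtain ⟨g1, g2⟩ := outer grid n m (n * m + 2) 0 (ownInit grid n m) (initA grid n m)
    (initA grid n m).q (ownInit grid n m).keys ((initA grid n m).q.length + n * m + 1)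
    hP.1 rfl hP.2.1 hFeq (by omega) (by omega)
  rw [g1, g2]
  set a := ((loopB grid (n : Int) (m : Int) (n * m + 2) (ownInit grid n m)
    (ownInit grid n m).keys).values.count 1) with ha
  set b := ((loopB grid (n : Int) (m : Int) (n * m + 2) (ownInit grid n m)
    (ownInit grid n m).keys).values.count 2) with hb
  by_cases h1 : b < a
  · rw [if_pos (by exact_mod_cast h1), if_pos h1]
  · rw [if_neg (by exact_mod_cast h1), if_neg h1]
    by_cases h2 : a < b
    · rw [if_pos (by exact_mod_cast h2), if_pos h2]
    · rw [if_neg (by exact_mod_cast h2), if_neg h2]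

-- ===== VERDICT (by name: the statement is the Claim_ definition above) =====
theorem winner_after_expansion_spec : Claim_equal_winner_after_expansion := by
  unfold Claim_equal_winner_after_expansion
  intro grid _ _
  unfold Spec_winner_after_expansion
  cases grid with
  | nil => rfl
  | cons r0 rest =>
    by_cases h0 : r0.length = 0
    · unfold winner_after_expansion winner_after_expansion_alt
      simp [h0]
    · exact main_nonempty r0 rest h0
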